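-- pv_equiv track=rewrite | github.com/henriquefarisco/CapyOS | tools/scripts/inspect_disk_boot.py | pick_kernel
-- ===== SOURCE A (Python) =====
-- def pick_kernel(entries, header_lba: int, header_sec: int):
--     if entries:
--         for etype, elba, esec, _ in entries:
--             if etype == 1 and elba and esec:
--                 return elba, esec, "manifest:normal"
--         for etype, elba, esec, _ in entries:
--             if etype == 2 and elba and esec:
--                 return elba, esec, "manifest:recovery"
--     return header_lba, header_sec, "header/fallback"
-- ===== SOURCE B (Python) =====
-- def pick_kernel(entries, header_lba: int, header_sec: int):
--     recovery = None
--     for etype, elba, esec, _ in entries: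
--         if etype == 1 and elba and esec:
--             return elba, esec, "manifest:normal"
--         if recovery is None and etype == 2 and elba and esec:
--             recovery = (elba, esec)
--     if recovery is not None:
--         return recovery[0], recovery[1], "manifest:recovery"
--     return header_lba, header_sec, "header/fallback"
-- ===== Notes on version B (the rewrite author's own statement) =====
-- stated objective: alternative
-- what changed: Replaces A's two sequential scans over entries with a single pass that returns a valid type-1 entry immediately and remembers the first valid type-2 entry in an accumulator for use after the loop.
import Mathlib
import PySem

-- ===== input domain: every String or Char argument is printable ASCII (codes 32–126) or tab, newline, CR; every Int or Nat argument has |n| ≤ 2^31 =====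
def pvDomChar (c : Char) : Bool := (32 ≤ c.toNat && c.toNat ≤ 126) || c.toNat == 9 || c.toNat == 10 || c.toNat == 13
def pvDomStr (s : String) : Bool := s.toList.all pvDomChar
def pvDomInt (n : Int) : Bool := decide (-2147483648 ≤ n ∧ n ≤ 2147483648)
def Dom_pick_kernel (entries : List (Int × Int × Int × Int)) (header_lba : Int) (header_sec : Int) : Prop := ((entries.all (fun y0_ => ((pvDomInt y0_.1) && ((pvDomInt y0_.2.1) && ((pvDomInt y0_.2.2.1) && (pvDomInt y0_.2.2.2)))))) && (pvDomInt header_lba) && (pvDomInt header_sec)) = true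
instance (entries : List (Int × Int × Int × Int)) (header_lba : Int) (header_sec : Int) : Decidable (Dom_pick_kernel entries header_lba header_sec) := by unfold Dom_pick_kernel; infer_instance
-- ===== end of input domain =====

-- B makes a single pass, returning a valid type-1 entry immediately and remembering
-- the first valid type-2 entry, instead of A's two sequential scans (objective: alternative).

-- ===== PORT A =====
-- first scan: first entry with etype == 1 and truthy elba, esec
def pkScan1 : List (Int × Int × Int × Int) → Option (Int × Int × String)
  | [] => none
  | (etype, elba, esec, _) :: rest =>
    if etype = 1 ∧ elba ≠ 0 ∧ esec ≠ 0 then some (elba, esec, "manifest:normal")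
    else pkScan1 rest

-- second scan: first entry with etype == 2 and truthy elba, esec
def pkScan2 : List (Int × Int × Int × Int) → Option (Int × Int × String)
  | [] => none
  | (etype, elba, esec, _) :: rest =>
    if etype = 2 ∧ elba ≠ 0 ∧ esec ≠ 0 then some (elba, esec, "manifest:recovery")
    else pkScan2 rest

def pick_kernel (entries : List (Int × Int × Int × Int)) (header_lba : Int) (header_sec : Int) : Int × Int × String :=
  if entries ≠ [] then
    match pkScan1 entries with
    | some r => r
    | none =>
      match pkScan2 entries with
      | some r => r
      | none => (header_lba, header_sec, "header/fallback")
  else (header_lba, header_sec, "header/fallback")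

-- ===== PORT B =====
-- single pass; `recovery` holds the first valid type-2 entry seen so far
def pkAltLoop (l : List (Int × Int × Int × Int)) (recovery : Option (Int × Int))
    (header_lba header_sec : Int) : Int × Int × String :=
  match l with
  | [] =>
    match recovery with
    | some (rl, rs) => (rl, rs, "manifest:recovery")
    | none => (header_lba, header_sec, "header/fallback")
  | (etype, elba, esec, _) :: rest =>
    if etype = 1 ∧ elba ≠ 0 ∧ esec ≠ 0 then (elba, esec, "manifest:normal")
    else
      pkAltLoop rest
        (if recovery = none ∧ etype = 2 ∧ elba ≠ 0 ∧ esec ≠ 0 then some (elba, esec) else recovery)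
        header_lba header_sec

def pick_kernel_alt (entries : List (Int × Int × Int × Int)) (header_lba : Int) (header_sec : Int) : Int × Int × String :=
  pkAltLoop entries none header_lba header_sec

-- ===== PRECONDITION & SPEC =====
def Spec_pick_kernel (entries : List (Int × Int × Int × Int)) (header_lba : Int) (header_sec : Int) (out : Int × Int × String) : Prop := out = pick_kernel_alt entries header_lba header_sec
instance (entries : List (Int × Int × Int × Int)) (header_lba : Int) (header_sec : Int) (out : Int × Int × String) : Decidable (Spec_pick_kernel entries header_lba header_sec out) := by unfold Spec_pick_kernel; infer_instance

-- ===== CLAIM (what is proved, stated in full; the proofs are below) =====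
def Claim_equal_pick_kernel : Prop := ∀ (entries : List (Int × Int × Int × Int)) (header_lba : Int) (header_sec : Int), Dom_pick_kernel entries header_lba header_sec → Spec_pick_kernel entries header_lba header_sec (pick_kernel entries header_lba header_sec)

-- ===== LEMMAS AND PROOFS =====
-- loop invariant: B's loop result is A's first scan, else the saved recovery, else A's second scan
theorem pkAltLoop_char (l : List (Int × Int × Int × Int)) (recovery : Option (Int × Int))
    (hl hs : Int) :
    pkAltLoop l recovery hl hs =
      match pkScan1 l with
      | some r => r
      | none =>
        match recovery with
        | some (rl, rs) => (rl, rs, "manifest:recovery")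
        | none =>
          match pkScan2 l with
          | some r => r
          | none => (hl, hs, "header/fallback") := by
  induction l generalizing recovery with
  | nil => simp [pkAltLoop, pkScan1, pkScan2]
  | cons e rest ih =>
    obtain ⟨etype, elba, esec, x⟩ := e
    simp only [pkAltLoop, pkScan1, pkScan2]
    by_cases h1 : etype = 1 ∧ elba ≠ 0 ∧ esec ≠ 0
    · simp [h1]
    · simp only [h1, if_false]
      rw [ih]
      rcases recovery with _ | ⟨rl, rs⟩
      · by_cases h2 : etype = 2 ∧ elba ≠ 0 ∧ esec ≠ 0 <;> simp [h2]
      · simp [h1]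

-- ===== VERDICT (by name: the statement is the Claim_ definition above) =====
theorem pick_kernel_spec : Claim_equal_pick_kernel := by
  intro entries hl hs _
  unfold Spec_pick_kernel pick_kernel pick_kernel_alt
  rw [pkAltLoop_char]
  cases entries with
  | nil => simp [pkScan1, pkScan2]
  | cons e rest => simp
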